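-- pv_equiv track=rewrite | github.com/lian2299/qaa-airtype | src/keyword_pipeline.py | strip_punctuation_around_keyword_segments
-- ===== SOURCE A (Python) =====
-- import unicodedata
--
-- def _is_strippable_punct_char(ch):
--     """Punctuation/symbol often inserted by voice IME around special terms."""
--     if not ch:
--         return False
--     return unicodedata.category(ch).startswith('P')
--
-- def _strip_trailing_punct(text):
--     i = len(text)
--     while i > 0 and _is_strippable_punct_char(text[i - 1]):
--         i -= 1
--     return text[:i]
--
-- def _strip_leading_punct(text):
--     i = 0
--     n = len(text)
--     while i < n and _is_strippable_punct_char(text[i]):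
--         i += 1
--     return text[i:]
--
-- def strip_punctuation_around_keyword_segments(segments, enabled):
--     """
--     For each keyword segment, remove adjacent punctuation from neighboring literal segments.
--     Voice input often wraps hotwords with commas/quotes; those should not be pasted.
--     """
--     if not enabled or not segments:
--         return segments
--     out = []
--     for s in segments:
--         if s.get('type') == 'literal':
--             out.append({'type': 'literal', 'text': s.get('text') or ''})
--         else:
--             out.append(dict(s))
--
--     n = len(out)
--     for i in range(n):
--         if out[i].get('type') != 'keyword':
--             continue
--         if i > 0 and out[i - 1].get('type') == 'literal':
--             t = out[i - 1].get('text') or ''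
--             out[i - 1]['text'] = _strip_trailing_punct(t)
--         if i + 1 < n and out[i + 1].get('type') == 'literal':
--             t = out[i + 1].get('text') or ''
--             out[i + 1]['text'] = _strip_leading_punct(t)
--
--     return [s for s in out if not (s.get('type') == 'literal' and not (s.get('text') or ''))]
-- ===== SOURCE B (Python) =====
-- import unicodedata
-- import itertools
--
--
-- def _punct(ch):
--     return unicodedata.category(ch).startswith('P')
--
--
-- def _lstrip_punct(text):
--     return ''.join(itertools.dropwhile(_punct, text))
--
--
-- def _rstrip_punct(text):
--     return _lstrip_punct(text[::-1])[::-1]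
--
--
-- def strip_punctuation_around_keyword_segments(segments, enabled):
--     if not enabled or not segments:
--         return segments
--     types = [s.get('type') for s in segments]
--     prevs = [None] + types[:-1]
--     nexts = types[1:] + [None]
--     res = []
--     for s, pt, nt in zip(segments, prevs, nexts):
--         if s.get('type') == 'literal':
--             t = s.get('text') or ''
--             if pt == 'keyword':
--                 t = _lstrip_punct(t)
--             if nt == 'keyword':
--                 t = _rstrip_punct(t)
--             if t:
--                 res.append({'type': 'literal', 'text': t})
--         else:
--             res.append(dict(s))
--     return res
-- ===== Notes on version B (the rewrite author's own statement) =====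
-- stated objective: simpler
-- what changed: A's three phases (normalising copy, keyword-driven in-place mutation of neighbour literals, then a filter pass) are fused into one literal-driven pass that builds each output segment directly from a segment and the types of its two original neighbours.
import Mathlib
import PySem

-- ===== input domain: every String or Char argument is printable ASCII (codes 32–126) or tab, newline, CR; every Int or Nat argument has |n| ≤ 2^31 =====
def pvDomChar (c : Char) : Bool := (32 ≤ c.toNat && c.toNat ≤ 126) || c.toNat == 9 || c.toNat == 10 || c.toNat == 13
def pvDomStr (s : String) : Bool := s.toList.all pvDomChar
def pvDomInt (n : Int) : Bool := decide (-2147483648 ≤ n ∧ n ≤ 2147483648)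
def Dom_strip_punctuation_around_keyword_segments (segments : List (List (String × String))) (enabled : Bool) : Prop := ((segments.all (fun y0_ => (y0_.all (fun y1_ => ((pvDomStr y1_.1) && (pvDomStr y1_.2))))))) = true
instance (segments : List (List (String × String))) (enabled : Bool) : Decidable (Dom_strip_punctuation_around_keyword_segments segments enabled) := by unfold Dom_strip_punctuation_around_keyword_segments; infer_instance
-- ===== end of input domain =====

-- B replaces A's three phases (normalising copy, keyword-driven in-place mutation, filter) by ONE literal-driven
-- pass that builds the output directly from each segment and its two original neighbours (objective: simpler).

-- ===== PORT A =====
-- unicodedata.category(ch).startswith('P'): listed here are exactly the category-P characters among the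
-- printable-ASCII range; exact on the stated domain (codes 32–126 plus tab/NL/CR, which are category Cc).
def pvIsPunct (c : Char) : Bool :=
  c ∈ ['!', '"', '#', '%', '&', '\'', '(', ')', '*', ',', '-', '.', '/', ':', ';', '?', '@', '[', '\\', ']', '_', '{', '}']

-- _strip_trailing_punct: the index loop removes the maximal punctuation suffix; structural recursion on the chars.
def pvStripTrailChars : List Char → List Char
  | [] => []
  | c :: cs =>
    match pvStripTrailChars cs with
    | [] => if pvIsPunct c then [] else [c]
    | r => c :: r

def pvStripTrail (t : String) : String := String.ofList (pvStripTrailChars t.toList)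

-- _strip_leading_punct: the index loop skips the maximal punctuation prefix.
def pvStripLeadChars : List Char → List Char
  | [] => []
  | c :: cs => if pvIsPunct c then pvStripLeadChars cs else c :: cs

def pvStripLead (t : String) : String := String.ofList (pvStripLeadChars t.toList)

-- s.get('type')
def pvTy (s : List (String × String)) : Option String := s.lookup "type"
-- s.get('text') or ''  (a missing key and an empty string both give '')
def pvTx (s : List (String × String)) : String := (s.lookup "text").getD ""
-- d['text'] = v : overwrite the first matching key in place, else append
def pvSetKey : List (String × String) → String → String → List (String × String)
  | [], k, v => [(k, v)]
  | (k', v') :: rest, k, v => if k' == k then (k', v) :: rest else (k', v') :: pvSetKey rest k v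

-- first loop body: literals are rebuilt as {'type':'literal','text':…}, others are copied (dict(s) = the same pairs)
def pvNorm (s : List (String × String)) : List (String × String) :=
  if pvTy s == some "literal" then [("type", "literal"), ("text", pvTx s)] else s

-- second loop body, one index i of range(n)
def pvStepA (n : Int) (lst : List (List (String × String))) (i : Int) : List (List (String × String)) :=
  if !(pvTy (PySem.List.pyGetD lst i []) == some "keyword") then lst
  else
    let lst1 :=
      if 0 < i && (pvTy (PySem.List.pyGetD lst (i - 1) []) == some "literal") then
        let t := pvTx (PySem.List.pyGetD lst (i - 1) [])
        PySem.List.pySetD lst (i - 1) (pvSetKey (PySem.List.pyGetD lst (i - 1) []) "text" (pvStripTrail t))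
      else lst
    if i + 1 < n && (pvTy (PySem.List.pyGetD lst1 (i + 1) []) == some "literal") then
      let t := pvTx (PySem.List.pyGetD lst1 (i + 1) [])
      PySem.List.pySetD lst1 (i + 1) (pvSetKey (PySem.List.pyGetD lst1 (i + 1) []) "text" (pvStripLead t))
    else lst1

def strip_punctuation_around_keyword_segments (segments : List (List (String × String))) (enabled : Bool) : List (List (String × String)) :=
  if !enabled || segments.isEmpty then segments
  else
    let out := segments.map pvNorm
    let n := PySem.List.len out
    let out2 := (PySem.List.pyRange 0 n 1).foldl (pvStepA n) out
    out2.filter (fun s => !(pvTy s == some "literal" && pvTx s == ""))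

-- ===== PORT B =====
-- B-side strip helpers: itertools.dropwhile, and the trailing strip via the reversed string
def pvLstripPunct (t : String) : String := String.ofList (t.toList.dropWhile pvIsPunct)
def pvRstripPunct (t : String) : String := String.ofList ((t.toList.reverse.dropWhile pvIsPunct).reverse)

-- loop body of B: a segment together with the types of its original neighbours gives 0 or 1 output segments
def pvAdjust (s : List (String × String)) (pt nt : Option String) : Option (List (String × String)) :=
  if pvTy s == some "literal" then
    let t0 := pvTx s
    let t1 := if pt == some "keyword" then pvLstripPunct t0 else t0
    let t2 := if nt == some "keyword" then pvRstripPunct t1 else t1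
    if t2 == "" then none else some [("type", "literal"), ("text", t2)]
  else some s

def strip_punctuation_around_keyword_segments_alt (segments : List (List (String × String))) (enabled : Bool) : List (List (String × String)) :=
  if !enabled || segments.isEmpty then segments
  else
    let types := segments.map pvTy
    let prevs := none :: types.dropLast
    let nexts := types.drop 1 ++ [none]
    (segments.zip (prevs.zip nexts)).filterMap (fun x => pvAdjust x.1 x.2.1 x.2.2)

-- ===== PRECONDITION & SPEC =====
def Spec_strip_punctuation_around_keyword_segments (segments : List (List (String × String))) (enabled : Bool) (out : List (List (String × String))) : Prop := out = strip_punctuation_around_keyword_segments_alt segments enabled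
instance (segments : List (List (String × String))) (enabled : Bool) (out : List (List (String × String))) : Decidable (Spec_strip_punctuation_around_keyword_segments segments enabled out) := by unfold Spec_strip_punctuation_around_keyword_segments; infer_instance

-- ===== CLAIM (what is proved, stated in full; the proofs are below) =====
def Claim_equal_strip_punctuation_around_keyword_segments : Prop := ∀ (segments : List (List (String × String))) (enabled : Bool), Dom_strip_punctuation_around_keyword_segments segments enabled → Spec_strip_punctuation_around_keyword_segments segments enabled (strip_punctuation_around_keyword_segments segments enabled)

-- ===== LEMMAS AND PROOFS =====

-- segment j of the original list (j < length in every use)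
def pvSegAt (segments : List (List (String × String))) (j : Nat) : List (String × String) := segments.getD j []

-- text of segment j after A's mutation loop has processed indices 0..k-1:
-- the leading strip (done by the keyword at j-1, step j-1) comes first, the trailing strip (keyword at j+1, step j+1) second
def pvExpText (segments : List (List (String × String))) (k j : Nat) : String :=
  let t0 := pvTx (pvSegAt segments j)
  let t1 := if 0 < j ∧ j ≤ k ∧ pvTy (pvSegAt segments (j - 1)) = some "keyword" then pvStripLead t0 else t0
  if j + 1 < k ∧ pvTy (pvSegAt segments (j + 1)) = some "keyword" then pvStripTrail t1 else t1

-- entry j of A's working list after processing indices 0..k-1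
def pvExpect (segments : List (List (String × String))) (k j : Nat) : List (String × String) :=
  if pvTy (pvSegAt segments j) = some "literal"
  then [("type", "literal"), ("text", pvExpText segments k j)]
  else pvSegAt segments j

theorem pvStripLeadChars_eq (cs : List Char) : pvStripLeadChars cs = cs.dropWhile pvIsPunct := by
  induction cs with
  | nil => rfl
  | cons c cs ih => by_cases hp : pvIsPunct c <;> simp [pvStripLeadChars, hp, ih]

theorem pvStripTrailChars_eq (cs : List Char) :
    pvStripTrailChars cs = (cs.reverse.dropWhile pvIsPunct).reverse := by
  induction cs with
  | nil => rfl
  | cons c cs ih =>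
    rw [List.reverse_cons, List.dropWhile_append]
    cases h : pvStripTrailChars cs with
    | nil =>
      have hd : cs.reverse.dropWhile pvIsPunct = [] := by
        rw [h] at ih; simpa using ih.symm
      simp only [pvStripTrailChars, h, hd, List.isEmpty_nil, if_true, List.dropWhile_cons,
        List.dropWhile_nil]
      split <;> simp
    | cons d r =>
      have hd : ¬ (cs.reverse.dropWhile pvIsPunct).isEmpty = true := by
        rw [ih] at h
        intro hc
        rw [List.isEmpty_iff] at hc
        simp [hc] at h
      simp [pvStripTrailChars, h, hd, ← ih]

theorem pvStripLead_eq (t : String) : pvStripLead t = pvLstripPunct t := by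
  simp [pvStripLead, pvLstripPunct, pvStripLeadChars_eq]

theorem pvStripTrail_eq (t : String) : pvStripTrail t = pvRstripPunct t := by
  simp [pvStripTrail, pvRstripPunct, pvStripTrailChars_eq]

theorem pvTy_expect (segments : List (List (String × String))) (k j : Nat) :
    pvTy (pvExpect segments k j) = pvTy (pvSegAt segments j) := by
  unfold pvExpect
  split
  · next h => rw [h]; rfl
  · rfl

theorem pvTx_expect (segments : List (List (String × String))) (k j : Nat)
    (h : pvTy (pvSegAt segments j) = some "literal") :
    pvTx (pvExpect segments k j) = pvExpText segments k j := by
  simp [pvExpect, h, pvTx, List.lookup]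

theorem pvSetKey_lit (t v : String) :
    pvSetKey [("type", "literal"), ("text", t)] "text" v = [("type", "literal"), ("text", v)] := by
  simp [pvSetKey]

-- the expected text is unchanged from step k to step k+1 for entries k is no keyword-neighbour of
theorem pvExpText_succ_other (segments : List (List (String × String))) (k j : Nat)
    (hA : j ≠ k + 1 ∨ ¬ pvTy (pvSegAt segments k) = some "keyword")
    (hB : j + 1 ≠ k ∨ ¬ pvTy (pvSegAt segments k) = some "keyword") :
    pvExpText segments (k + 1) j = pvExpText segments k j := by
  have e1 : (0 < j ∧ j ≤ k + 1 ∧ pvTy (pvSegAt segments (j - 1)) = some "keyword")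
          ↔ (0 < j ∧ j ≤ k ∧ pvTy (pvSegAt segments (j - 1)) = some "keyword") := by
    constructor
    · rintro ⟨a, b, c⟩
      refine ⟨a, ?_, c⟩
      by_cases hj : j = k + 1
      · exfalso
        rcases hA with hA | hA
        · exact hA hj
        · exact hA (by rw [show k = j - 1 by omega]; exact c)
      · omega
    · rintro ⟨a, b, c⟩; exact ⟨a, by omega, c⟩
  have e2 : (j + 1 < k + 1 ∧ pvTy (pvSegAt segments (j + 1)) = some "keyword")
          ↔ (j + 1 < k ∧ pvTy (pvSegAt segments (j + 1)) = some "keyword") := by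
    constructor
    · rintro ⟨a, c⟩
      refine ⟨?_, c⟩
      by_cases hj : j + 1 = k
      · exfalso
        rcases hB with hB | hB
        · exact hB hj
        · exact hB (by rw [show k = j + 1 by omega]; exact c)
      · omega
    · rintro ⟨a, c⟩; exact ⟨by omega, c⟩
  simp only [pvExpText, e1, e2]

theorem pvExpText_succ_prev (segments : List (List (String × String))) (k : Nat) (hk0 : 0 < k)
    (hkw : pvTy (pvSegAt segments k) = some "keyword") :
    pvExpText segments (k + 1) (k - 1) = pvStripTrail (pvExpText segments k (k - 1)) := by
  have hBk : ¬ (k - 1 + 1 < k ∧ pvTy (pvSegAt segments (k - 1 + 1)) = some "keyword") := by omega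
  have hBk1 : (k - 1 + 1 < k + 1 ∧ pvTy (pvSegAt segments (k - 1 + 1)) = some "keyword") :=
    ⟨by omega, by rw [show k - 1 + 1 = k by omega]; exact hkw⟩
  have e1 : (0 < k - 1 ∧ k - 1 ≤ k + 1 ∧ pvTy (pvSegAt segments (k - 1 - 1)) = some "keyword")
          ↔ (0 < k - 1 ∧ k - 1 ≤ k ∧ pvTy (pvSegAt segments (k - 1 - 1)) = some "keyword") := by
    constructor <;> (rintro ⟨a, b, c⟩; exact ⟨a, by omega, c⟩)
  simp only [pvExpText]
  rw [if_pos hBk1, if_neg hBk, if_congr e1 rfl rfl]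

theorem pvExpText_succ_next (segments : List (List (String × String))) (k : Nat)
    (hkw : pvTy (pvSegAt segments k) = some "keyword") :
    pvExpText segments (k + 1) (k + 1) = pvStripLead (pvTx (pvSegAt segments (k + 1))) := by
  unfold pvExpText
  have hA : (0 < k + 1 ∧ k + 1 ≤ k + 1 ∧ pvTy (pvSegAt segments (k + 1 - 1)) = some "keyword") := by
    refine ⟨by omega, by omega, ?_⟩
    simpa using hkw
  have hB : ¬ (k + 1 + 1 < k + 1 ∧ pvTy (pvSegAt segments (k + 1 + 1)) = some "keyword") := by omega
  simp only [if_pos hA, if_neg hB]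

theorem pvExpText_at_next (segments : List (List (String × String))) (k : Nat) :
    pvExpText segments k (k + 1) = pvTx (pvSegAt segments (k + 1)) := by
  unfold pvExpText
  have hA : ¬ (0 < k + 1 ∧ k + 1 ≤ k ∧ pvTy (pvSegAt segments (k + 1 - 1)) = some "keyword") := by omega
  have hB : ¬ (k + 1 + 1 < k ∧ pvTy (pvSegAt segments (k + 1 + 1)) = some "keyword") := by omega
  simp only [if_neg hA, if_neg hB]

-- entry j is unchanged from step k to step k+1 when k is not a keyword-neighbour acting on a literal j
theorem pvExpect_succ_other (segments : List (List (String × String))) (k j : Nat)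
    (hA : j ≠ k + 1 ∨ ¬ pvTy (pvSegAt segments j) = some "literal" ∨ ¬ pvTy (pvSegAt segments k) = some "keyword")
    (hB : j + 1 ≠ k ∨ ¬ pvTy (pvSegAt segments j) = some "literal" ∨ ¬ pvTy (pvSegAt segments k) = some "keyword") :
    pvExpect segments (k + 1) j = pvExpect segments k j := by
  by_cases hl : pvTy (pvSegAt segments j) = some "literal"
  · have hA' : j ≠ k + 1 ∨ ¬ pvTy (pvSegAt segments k) = some "keyword" := by tauto
    have hB' : j + 1 ≠ k ∨ ¬ pvTy (pvSegAt segments k) = some "keyword" := by tauto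
    simp only [pvExpect, hl, if_true, pvExpText_succ_other segments k j hA' hB']
  · simp only [pvExpect, hl, if_false]

theorem pvExpect_succ_resid (segments : List (List (String × String))) (k j : Nat)
    (hA : j = k + 1 → ¬ pvTy (pvSegAt segments j) = some "literal")
    (hB : j + 1 = k → ¬ pvTy (pvSegAt segments j) = some "literal") :
    pvExpect segments (k + 1) j = pvExpect segments k j := by
  apply pvExpect_succ_other
  · by_cases h : j = k + 1
    · exact Or.inr (Or.inl (hA h))
    · exact Or.inl h
  · by_cases h : j + 1 = k
    · exact Or.inr (Or.inl (hB h))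
    · exact Or.inl h

-- the key elementwise step: applying A's loop body at index k to the state after k steps gives the state after k+1
theorem pvStepA_map (segments : List (List (String × String))) (k : Nat) (hk : k < segments.length) :
    pvStepA (segments.length : Int)
      ((List.range segments.length).map (pvExpect segments k)) (k : Int)
      = (List.range segments.length).map (pvExpect segments (k + 1)) := by
  have hgetL : ∀ (i : Nat), i < segments.length →
      PySem.List.pyGetD ((List.range segments.length).map (pvExpect segments k)) (i : Int) []
        = pvExpect segments k i := by
    intro i hi
    rw [PySem.List.pyGetD_natCast, PySem.List.getD_map_range _ _ _ _ hi]
  unfold pvStepA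
  by_cases hkw : pvTy (pvSegAt segments k) = some "keyword"
  case neg =>
    rw [if_pos]
    · exact List.map_congr_left (fun j _ =>
        (pvExpect_succ_other segments k j (Or.inr (Or.inr hkw)) (Or.inr (Or.inr hkw))).symm)
    · rw [hgetL k hk, pvTy_expect]
      simpa using hkw
  case pos =>
    rw [if_neg (by rw [hgetL k hk, pvTy_expect, hkw]; simp)]
    -- resolve the first update (index k-1)
    by_cases hk0 : 0 < k
    · have hcm : ((k : Int) - 1) = ((k - 1 : Nat) : Int) := by omega
      rw [hcm, hgetL (k - 1) (by omega)]
      by_cases hlit1 : pvTy (pvSegAt segments (k - 1)) = some "literal"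
      · have hb1 : (decide (0 < (k : Int)) && (pvTy (pvExpect segments k (k - 1)) == some "literal")) = true := by
          rw [pvTy_expect, hlit1]; simp; exact_mod_cast hk0
        have hv1 : pvSetKey (pvExpect segments k (k - 1)) "text"
              (pvStripTrail (pvTx (pvExpect segments k (k - 1))))
            = [("type", "literal"), ("text", pvStripTrail (pvExpText segments k (k - 1)))] := by
          rw [pvTx_expect segments k (k - 1) hlit1]
          simp [pvExpect, hlit1, pvSetKey_lit]
        simp only [hb1]
        rw [if_pos trivial, hv1, PySem.List.pySetD_natCast]
        have hget2 : ∀ (v : List (String × String)), k + 1 < segments.length →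
            PySem.List.pyGetD (((List.range segments.length).map (pvExpect segments k)).set (k - 1) v) ((k : Int) + 1) []
              = pvExpect segments k (k + 1) := by
          intro v h2
          have hc1 : ((k : Int) + 1) = ((k + 1 : Nat) : Int) := by push_cast; ring
          rw [hc1, PySem.List.pyGetD_natCast, List.getD_eq_getElem?_getD]
          rw [List.getElem?_set_ne (by omega)]
          simp [h2]
        by_cases hk2 : k + 1 < segments.length
        · rw [hget2 _ hk2]
          by_cases hlit2 : pvTy (pvSegAt segments (k + 1)) = some "literal"
          · have hb2 : (decide ((k : Int) + 1 < (segments.length : Int)) && (pvTy (pvExpect segments k (k + 1)) == some "literal")) = true := by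
              rw [pvTy_expect, hlit2]; simp; omega
            have hv2 : pvSetKey (pvExpect segments k (k + 1)) "text"
                  (pvStripLead (pvTx (pvExpect segments k (k + 1))))
                = [("type", "literal"), ("text", pvStripLead (pvTx (pvSegAt segments (k + 1))))] := by
              rw [pvTx_expect segments k (k + 1) hlit2, pvExpText_at_next]
              simp [pvExpect, hlit2, pvExpText_at_next, pvSetKey_lit]
            simp only [hb2]
            rw [if_pos trivial, hv2]
            rw [show ((k : Int) + 1) = ((k + 1 : Nat) : Int) from by push_cast; ring,
              PySem.List.pySetD_natCast]
            apply List.ext_getElem (by simp)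
            intro j h1 h2
            have hjn : j < segments.length := by simpa using h2
            rw [List.getElem_set, List.getElem_set]
            simp only [List.getElem_map, List.getElem_range]
            by_cases hj2 : j = k + 1
            · rw [if_pos hj2.symm, hj2]
              simp [pvExpect, hlit2, pvExpText_succ_next segments k hkw]
            · rw [if_neg (fun h => hj2 h.symm)]
              by_cases hj1 : j = k - 1
              · rw [if_pos hj1.symm, hj1]
                simp [pvExpect, hlit1, pvExpText_succ_prev segments k hk0 hkw]
              · rw [if_neg (fun h => hj1 h.symm)]
                exact (pvExpect_succ_resid segments k j (fun h => absurd h hj2)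
                  (fun h => absurd (by omega) hj1)).symm
          · have hb2 : (decide ((k : Int) + 1 < (segments.length : Int)) && (pvTy (pvExpect segments k (k + 1)) == some "literal")) = false := by
              rw [pvTy_expect]; simp [hlit2]
            simp only [hb2]
            rw [if_neg Bool.false_ne_true]
            apply List.ext_getElem (by simp)
            intro j h1 h2
            have hjn : j < segments.length := by simpa using h2
            rw [List.getElem_set]
            simp only [List.getElem_map, List.getElem_range]
            by_cases hj1 : j = k - 1
            · rw [if_pos hj1.symm, hj1]
              simp [pvExpect, hlit1, pvExpText_succ_prev segments k hk0 hkw]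
            · rw [if_neg (fun h => hj1 h.symm)]
              exact (pvExpect_succ_resid segments k j (fun h => by rw [h]; exact hlit2)
                (fun h => absurd (by omega) hj1)).symm
        · have hb2 : decide ((k : Int) + 1 < (segments.length : Int)) = false := by
            simp; omega
          simp only [hb2, Bool.false_and]
          rw [if_neg Bool.false_ne_true]
          apply List.ext_getElem (by simp)
          intro j h1 h2
          have hjn : j < segments.length := by simpa using h2
          rw [List.getElem_set]
          simp only [List.getElem_map, List.getElem_range]
          by_cases hj1 : j = k - 1
          · rw [if_pos hj1.symm, hj1]
            simp [pvExpect, hlit1, pvExpText_succ_prev segments k hk0 hkw]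
          · rw [if_neg (fun h => hj1 h.symm)]
            exact (pvExpect_succ_resid segments k j (fun h => absurd (by omega) hk2)
              (fun h => absurd (by omega) hj1)).symm
      · have hb1 : (decide (0 < (k : Int)) && (pvTy (pvExpect segments k (k - 1)) == some "literal")) = false := by
          rw [pvTy_expect]; simp [hlit1]
        simp only [hb1]
        rw [if_neg Bool.false_ne_true]
        by_cases hk2 : k + 1 < segments.length
        · rw [show ((k : Int) + 1) = ((k + 1 : Nat) : Int) from by push_cast; ring,
            hgetL (k + 1) hk2]
          by_cases hlit2 : pvTy (pvSegAt segments (k + 1)) = some "literal"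
          · have hb2 : (decide (((k + 1 : Nat) : Int) < (segments.length : Int)) && (pvTy (pvExpect segments k (k + 1)) == some "literal")) = true := by
              rw [pvTy_expect, hlit2]; simp; omega
            have hv2 : pvSetKey (pvExpect segments k (k + 1)) "text"
                  (pvStripLead (pvTx (pvExpect segments k (k + 1))))
                = [("type", "literal"), ("text", pvStripLead (pvTx (pvSegAt segments (k + 1))))] := by
              rw [pvTx_expect segments k (k + 1) hlit2, pvExpText_at_next]
              simp [pvExpect, hlit2, pvExpText_at_next, pvSetKey_lit]
            simp only [hb2]
            rw [if_pos trivial, hv2, PySem.List.pySetD_natCast]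
            apply List.ext_getElem (by simp)
            intro j h1 h2
            have hjn : j < segments.length := by simpa using h2
            rw [List.getElem_set]
            simp only [List.getElem_map, List.getElem_range]
            by_cases hj2 : j = k + 1
            · rw [if_pos hj2.symm, hj2]
              simp [pvExpect, hlit2, pvExpText_succ_next segments k hkw]
            · rw [if_neg (fun h => hj2 h.symm)]
              exact (pvExpect_succ_resid segments k j (fun h => absurd h hj2)
                (fun h => by
                  have hj1 : j = k - 1 := by omega
                  rw [hj1]; exact hlit1)).symm
          · have hb2 : (decide (((k + 1 : Nat) : Int) < (segments.length : Int)) && (pvTy (pvExpect segments k (k + 1)) == some "literal")) = false := by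
              rw [pvTy_expect]; simp [hlit2]
            simp only [hb2]
            rw [if_neg Bool.false_ne_true]
            exact List.map_congr_left (fun j _ =>
              (pvExpect_succ_resid segments k j (fun h => by rw [h]; exact hlit2) (fun h => by
                have hj1 : j = k - 1 := by omega
                rw [hj1]; exact hlit1)).symm)
        · have hb2 : decide ((k : Int) + 1 < (segments.length : Int)) = false := by
            simp; omega
          simp only [hb2, Bool.false_and]
          rw [if_neg Bool.false_ne_true]
          exact List.map_congr_left (fun j hjm => by
            have hjn : j < segments.length := List.mem_range.mp hjm
            exact (pvExpect_succ_resid segments k j (fun h => absurd (by omega) hk2)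
              (fun h => by
                have hj1 : j = k - 1 := by omega
                rw [hj1]; exact hlit1)).symm)
    · have hb1 : decide (0 < (k : Int)) = false := by simp; omega
      simp only [hb1, Bool.false_and]
      rw [if_neg Bool.false_ne_true]
      by_cases hk2 : k + 1 < segments.length
      · rw [show ((k : Int) + 1) = ((k + 1 : Nat) : Int) from by push_cast; ring,
          hgetL (k + 1) hk2]
        by_cases hlit2 : pvTy (pvSegAt segments (k + 1)) = some "literal"
        · have hb2 : (decide (((k + 1 : Nat) : Int) < (segments.length : Int)) && (pvTy (pvExpect segments k (k + 1)) == some "literal")) = true := by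
            rw [pvTy_expect, hlit2]; simp; omega
          have hv2 : pvSetKey (pvExpect segments k (k + 1)) "text"
                (pvStripLead (pvTx (pvExpect segments k (k + 1))))
              = [("type", "literal"), ("text", pvStripLead (pvTx (pvSegAt segments (k + 1))))] := by
            rw [pvTx_expect segments k (k + 1) hlit2, pvExpText_at_next]
            simp [pvExpect, hlit2, pvExpText_at_next, pvSetKey_lit]
          simp only [hb2]
          rw [if_pos trivial, hv2, PySem.List.pySetD_natCast]
          apply List.ext_getElem (by simp)
          intro j h1 h2
          have hjn : j < segments.length := by simpa using h2
          rw [List.getElem_set]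
          simp only [List.getElem_map, List.getElem_range]
          by_cases hj2 : j = k + 1
          · rw [if_pos hj2.symm, hj2]
            simp [pvExpect, hlit2, pvExpText_succ_next segments k hkw]
          · rw [if_neg (fun h => hj2 h.symm)]
            exact (pvExpect_succ_resid segments k j (fun h => absurd h hj2)
              (fun h => absurd (by omega) hk0)).symm
        · have hb2 : (decide (((k + 1 : Nat) : Int) < (segments.length : Int)) && (pvTy (pvExpect segments k (k + 1)) == some "literal")) = false := by
            rw [pvTy_expect]; simp [hlit2]
          simp only [hb2]
          rw [if_neg Bool.false_ne_true]
          exact List.map_congr_left (fun j _ =>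
            (pvExpect_succ_resid segments k j (fun h => by rw [h]; exact hlit2)
              (fun h => absurd (by omega) hk0)).symm)
      · have hb2 : decide ((k : Int) + 1 < (segments.length : Int)) = false := by
          simp; omega
        simp only [hb2, Bool.false_and]
        rw [if_neg Bool.false_ne_true]
        exact List.map_congr_left (fun j hjm => by
          have hjn : j < segments.length := List.mem_range.mp hjm
          exact (pvExpect_succ_resid segments k j (fun h => absurd (by omega) hk2)
            (fun h => absurd (by omega) hk0)).symm)

theorem pvLoopInv (segments : List (List (String × String))) (k : Nat) (hk : k ≤ segments.length) :
    (PySem.List.pyRange 0 (k : Int) 1).foldl (pvStepA (segments.length : Int)) (segments.map pvNorm)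
      = (List.range segments.length).map (pvExpect segments k) := by
  induction k with
  | zero =>
    rw [PySem.List.pyRange_one_eq_nil (by omega)]
    simp only [List.foldl_nil]
    apply List.ext_getElem (by simp)
    intro j h1 h2
    have hjn : j < segments.length := by simpa using h1
    simp only [List.getElem_map, List.getElem_range]
    have hseg : pvSegAt segments j = segments[j]'hjn := by
      simp [pvSegAt, List.getD_eq_getElem?_getD, List.getElem?_eq_getElem hjn]
    unfold pvNorm pvExpect pvExpText
    have hA : ¬ (0 < j ∧ j ≤ 0 ∧ pvTy (pvSegAt segments (j - 1)) = some "keyword") := by omega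
    have hB : ¬ (j + 1 < 0 ∧ pvTy (pvSegAt segments (j + 1)) = some "keyword") := by omega
    simp only [if_neg hA, if_neg hB, hseg]
    by_cases hl : pvTy (segments[j]'hjn) = some "literal" <;> simp [hl]
  | succ k ih =>
    have h1 : ((k : Int) + 1) = ((k + 1 : Nat) : Int) := by push_cast; ring
    have h2 : ((k + 1 : Nat) : Int) = (k : Int) + 1 := by push_cast; ring
    rw [h2, PySem.List.pyRange_one_succ_right (by omega), List.foldl_append,
      ih (by omega), List.foldl_cons, List.foldl_nil]
    exact pvStepA_map segments k (by omega)

-- glue: filtering a mapped list equals a filterMap, given the pointwise relation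
theorem pvFilterMapGlue {α β : Type} (p : β → Bool) (f : α → β) (g : α → Option β) (l : List α)
    (h : ∀ a ∈ l, (if p (f a) then some (f a) else none) = g a) :
    (l.map f).filter p = l.filterMap g := by
  induction l with
  | nil => rfl
  | cons a l ih =>
    have ha := h a (by simp)
    have ihh := ih (fun b hb => h b (by simp [hb]))
    simp only [List.map_cons, List.filter_cons, List.filterMap_cons]
    cases hp : p (f a) <;> simp [hp] at ha <;> rw [← ha] <;> simp [ihh]

-- B's zipped triples, elementwise
theorem pvZip_eq (segments : List (List (String × String))) :
    segments.zip ((none :: (segments.map pvTy).dropLast).zip ((segments.map pvTy).drop 1 ++ [none]))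
      = (List.range segments.length).map (fun j =>
          (pvSegAt segments j,
           (if 0 < j then pvTy (pvSegAt segments (j - 1)) else none),
           (if j + 1 < segments.length then pvTy (pvSegAt segments (j + 1)) else none))) := by
  apply List.ext_getElem
  · simp; omega
  · intro j h1 h2
    have hjn : j < segments.length := by simpa using h2
    have hseg : ∀ (i : Nat) (hi : i < segments.length), pvSegAt segments i = segments[i]'hi := by
      intro i hi
      simp [pvSegAt, List.getD_eq_getElem?_getD, List.getElem?_eq_getElem hi]
    simp only [List.getElem_zip, List.getElem_map, List.getElem_range]
    refine Prod.ext ?_ (Prod.ext ?_ ?_) <;> simp only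
    · exact (hseg j hjn).symm
    · cases j with
      | zero => simp
      | succ i =>
        have hi : i < segments.length - 1 := by
          have := h1; simp at this; omega
        simp only [List.getElem_cons_succ, List.getElem_dropLast, List.getElem_map]
        rw [if_pos (by omega), show i + 1 - 1 = i by omega, hseg i (by omega)]
    · by_cases hl : j + 1 < segments.length
      · rw [if_pos hl]
        rw [List.getElem_append_left (by simp; omega)]
        simp only [List.getElem_drop, List.getElem_map]
        rw [hseg (j + 1) hl]
        simp only [Nat.add_comm 1 j]
      · rw [if_neg hl]
        have hj : j = segments.length - 1 := by omega
        have hlen : ((segments.map pvTy).drop 1).length = segments.length - 1 := by simp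
        rw [List.getElem_append_right (by simp; omega)]
        simp

-- the two off-guard bodies agree pointwise
theorem pvPointwise (segments : List (List (String × String))) (j : Nat) (hj : j < segments.length) :
    (if (!(pvTy (pvExpect segments segments.length j) == some "literal" && pvTx (pvExpect segments segments.length j) == ""))
       then some (pvExpect segments segments.length j) else none)
      = pvAdjust (pvSegAt segments j)
          (if 0 < j then pvTy (pvSegAt segments (j - 1)) else none)
          (if j + 1 < segments.length then pvTy (pvSegAt segments (j + 1)) else none) := by
  by_cases hl : pvTy (pvSegAt segments j) = some "literal"
  · have hty := pvTy_expect segments segments.length j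
    have htx := pvTx_expect segments segments.length j hl
    have hexp : pvExpect segments segments.length j
        = [("type", "literal"), ("text", pvExpText segments segments.length j)] := by
      simp [pvExpect, hl]
    have hadj : pvAdjust (pvSegAt segments j)
          (if 0 < j then pvTy (pvSegAt segments (j - 1)) else none)
          (if j + 1 < segments.length then pvTy (pvSegAt segments (j + 1)) else none)
        = (if pvExpText segments segments.length j == "" then none
           else some [("type", "literal"), ("text", pvExpText segments segments.length j)]) := by
      have hpt : ((if 0 < j then pvTy (pvSegAt segments (j - 1)) else none) == some "keyword") = true
          ↔ (0 < j ∧ j ≤ segments.length ∧ pvTy (pvSegAt segments (j - 1)) = some "keyword") := by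
        by_cases h0 : 0 < j <;> simp [h0]
        omega
      have hnt : ((if j + 1 < segments.length then pvTy (pvSegAt segments (j + 1)) else none) == some "keyword") = true
          ↔ (j + 1 < segments.length ∧ pvTy (pvSegAt segments (j + 1)) = some "keyword") := by
        by_cases h0 : j + 1 < segments.length <;> simp [h0]
      simp only [pvAdjust, hl, beq_self_eq_true, if_true, pvExpText]
      rw [← pvStripLead_eq, ← pvStripTrail_eq]
      by_cases c1 : (0 < j ∧ j ≤ segments.length ∧ pvTy (pvSegAt segments (j - 1)) = some "keyword") <;>
        by_cases c2 : (j + 1 < segments.length ∧ pvTy (pvSegAt segments (j + 1)) = some "keyword") <;>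
          first
            | rw [if_congr hpt rfl rfl, if_congr hnt rfl rfl, if_pos c1, if_pos c2]
            | rw [if_congr hpt rfl rfl, if_congr hnt rfl rfl, if_pos c1, if_neg c2]
            | rw [if_congr hpt rfl rfl, if_congr hnt rfl rfl, if_neg c1, if_pos c2]
            | rw [if_congr hpt rfl rfl, if_congr hnt rfl rfl, if_neg c1, if_neg c2]
    rw [hadj, hexp]
    have : (pvTy [("type", "literal"), ("text", pvExpText segments segments.length j)] == some "literal") = true := by
      simp [pvTy, List.lookup]
    have htxe : pvTx [("type", "literal"), ("text", pvExpText segments segments.length j)]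
        = pvExpText segments segments.length j := by
      simp [pvTx, List.lookup]
    rw [this, htxe]
    by_cases he : pvExpText segments segments.length j = "" <;> simp [he]
  · have hexp : pvExpect segments segments.length j = pvSegAt segments j := by
      simp [pvExpect, hl]
    rw [hexp]
    have h1 : (pvTy (pvSegAt segments j) == some "literal") = false := by
      simpa using hl
    simp [pvAdjust, h1]

theorem strip_punctuation_around_keyword_segments_spec : Claim_equal_strip_punctuation_around_keyword_segments := by
  intro segments enabled _
  unfold Spec_strip_punctuation_around_keyword_segments
  unfold strip_punctuation_around_keyword_segments strip_punctuation_around_keyword_segments_alt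
  by_cases hg : (!enabled || segments.isEmpty) = true
  · rw [if_pos hg, if_pos hg]
  · rw [if_neg hg, if_neg hg]
    have hlen : PySem.List.len (segments.map pvNorm) = (segments.length : Int) := by
      simp [PySem.List.len_eq]
    simp only []
    rw [hlen, pvLoopInv segments segments.length le_rfl, pvZip_eq, List.filterMap_map]
    exact pvFilterMapGlue _ _ _ _ (fun j hj =>
      pvPointwise segments j (List.mem_range.mp hj))
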